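-- pv_equiv track=rewrite | github.com/rajshashank/technical_bootcamp | maxSeats.py | max_consecutive_free_seats
-- ===== SOURCE A (Python) =====
-- def max_consecutive_free_seats(arr):
--     max_count = 0
--     current_count = 0
--
--     for seat in arr:
--         if seat == 'S':
--             current_count += 1
--             max_count = max(max_count, current_count)
--         else:
--             current_count = 0
--
--     return max_count
-- ===== SOURCE B (Python) =====
-- def max_consecutive_free_seats(arr):
--     best = 0
--     i = 0
--     n = len(arr)
--     while i < n:
--         if arr[i] == 'S':
--             j = i + 1
--             while j < n and arr[j] == 'S':
--                 j += 1
--             if j - i > best: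
--                 best = j - i
--             i = j
--         else:
--             i += 1
--     return best
-- ===== Notes on version B (the rewrite author's own statement) =====
-- stated objective: alternative
-- what changed: Replaces the running-counter-with-reset single pass by a two-pointer run scanner: jump to each maximal block of 'S', measure its whole length at once, and keep the longest.
import Mathlib
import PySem

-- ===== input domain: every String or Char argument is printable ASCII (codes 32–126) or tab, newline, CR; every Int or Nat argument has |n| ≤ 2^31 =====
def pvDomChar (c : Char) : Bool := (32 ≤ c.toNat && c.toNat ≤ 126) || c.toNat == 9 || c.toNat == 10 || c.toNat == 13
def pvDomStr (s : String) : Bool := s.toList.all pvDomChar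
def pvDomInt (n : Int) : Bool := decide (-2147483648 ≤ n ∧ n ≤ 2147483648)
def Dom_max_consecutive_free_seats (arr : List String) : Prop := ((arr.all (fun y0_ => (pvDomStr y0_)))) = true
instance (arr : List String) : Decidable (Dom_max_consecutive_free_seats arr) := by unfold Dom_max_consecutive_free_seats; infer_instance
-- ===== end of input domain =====

-- B replaces A's running-counter-with-reset pass by a two-pointer scan over maximal runs of "S"; return values are proved equal on all inputs.

-- ===== PORT A =====
-- A: fold with state (max_count, current_count)
def max_consecutive_free_seats (arr : List String) : Int :=
  (arr.foldl
    (fun (st : Int × Int) seat =>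
      if seat == "S" then (max st.1 (st.2 + 1), st.2 + 1) else (st.1, 0))
    (0, 0)).1

-- ===== PORT B =====
-- B: at each "S" measure the whole maximal run (inner scan = takeWhile/dropWhile),
-- keep the longest, and resume after the run.
def max_consecutive_free_seats_alt (arr : List String) : Int :=
  match arr with
  | [] => 0
  | x :: xs =>
    if x == "S" then
      let run := xs.takeWhile (fun s => s == "S")
      max ((run.length : Int) + 1)
          (max_consecutive_free_seats_alt (xs.dropWhile (fun s => s == "S")))
    else
      max_consecutive_free_seats_alt xs
termination_by arr.length
decreasing_by
  · exact Nat.lt_succ_of_le (List.length_dropWhile_le _ _)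
  · simp

-- ===== PRECONDITION & SPEC =====
def Spec_max_consecutive_free_seats (arr : List String) (out : Int) : Prop := out = max_consecutive_free_seats_alt arr
instance (arr : List String) (out : Int) : Decidable (Spec_max_consecutive_free_seats arr out) := by unfold Spec_max_consecutive_free_seats; infer_instance

-- ===== CLAIM (what is proved, stated in full; the proofs are below) =====
def Claim_equal_max_consecutive_free_seats : Prop := ∀ (arr : List String), Dom_max_consecutive_free_seats arr → Spec_max_consecutive_free_seats arr (max_consecutive_free_seats arr)

-- ===== LEMMAS AND PROOFS =====

-- A's loop body, named for the lemmas
def pvStepA (st : Int × Int) (seat : String) : Int × Int :=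
  if seat == "S" then (max st.1 (st.2 + 1), st.2 + 1) else (st.1, 0)

lemma foldA_eq (arr : List String) :
    max_consecutive_free_seats arr = (arr.foldl pvStepA (0, 0)).1 := rfl

-- folding A's step over a block of "S"s
lemma foldA_run (t : List String) (ht : ∀ y ∈ t, y == "S") (m c : Int) (hc : c ≤ m) :
    t.foldl pvStepA (m, c) = (max m (c + t.length), c + t.length) := by
  induction t generalizing m c with
  | nil => simp; omega
  | cons y ys ih =>
    have hy : y == "S" := ht y (by simp)
    have hys : ∀ z ∈ ys, z == "S" := fun z hz => ht z (by simp [hz])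
    have hstep : pvStepA (m, c) y = (max m (c + 1), c + 1) := by
      simp [pvStepA, hy]
    rw [List.foldl_cons, hstep, ih hys _ _ (le_max_right _ _)]
    simp only [List.length_cons, Prod.mk.injEq]
    constructor <;> (push_cast; omega)

lemma altGo_nonneg (arr : List String) : 0 ≤ max_consecutive_free_seats_alt arr := by
  induction arr using max_consecutive_free_seats_alt.induct with
  | case1 => simp [max_consecutive_free_seats_alt]
  | case2 x xs hx ih =>
    rw [max_consecutive_free_seats_alt]
    simp only [hx, if_pos]
    exact le_trans ih (le_max_right _ _)
  | case3 x xs hx ih =>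
    simpa [max_consecutive_free_seats_alt, hx] using ih

lemma main_lemma (arr : List String) (m : Int) (hm : 0 ≤ m) :
    (arr.foldl pvStepA (m, 0)).1 = max m (max_consecutive_free_seats_alt arr) := by
  induction arr using max_consecutive_free_seats_alt.induct generalizing m with
  | case1 =>
    simp [max_consecutive_free_seats_alt]
    omega
  | case2 x xs hx ih =>
    have hrun : ∀ y ∈ xs.takeWhile (fun s => s == "S"), y == "S" := by
      intro y hy; exact List.mem_takeWhile_imp (p := fun s => s == "S") hy
    have hsplit : xs = xs.takeWhile (fun s => s == "S") ++ xs.dropWhile (fun s => s == "S") :=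
      (List.takeWhile_append_dropWhile).symm
    have halt : max_consecutive_free_seats_alt (x :: xs)
        = max ((↑(xs.takeWhile (fun s => s == "S")).length : Int) + 1)
              (max_consecutive_free_seats_alt (xs.dropWhile (fun s => s == "S"))) := by
      rw [max_consecutive_free_seats_alt]; simp [hx]
    rw [halt, List.foldl_cons]
    have hstep : pvStepA (m, 0) x = (max m 1, 1) := by
      simp [pvStepA, hx]
    rw [hstep]
    conv_lhs => rw [hsplit]
    rw [List.foldl_append]
    rw [foldA_run _ hrun _ _ (le_max_right _ _)]
    -- state after the run: (max m (1 + len), 1 + len)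
    cases hd : xs.dropWhile (fun s => s == "S") with
    | nil =>
      simp only [List.foldl_nil, max_consecutive_free_seats_alt]
      omega
    | cons y ys =>
      have hy : ¬ (y == "S") = true := by
        have := List.head?_dropWhile_not (fun s => s == "S") xs
        simp [hd] at this
        simpa using this
      rw [List.foldl_cons]
      have hstep2 : pvStepA (max (max m 1) (1 + ↑(xs.takeWhile (fun s => s == "S")).length), 1 + ↑(xs.takeWhile (fun s => s == "S")).length) y
          = (max (max m 1) (1 + ↑(xs.takeWhile (fun s => s == "S")).length), 0) := by
        simp [pvStepA, hy]
      rw [hstep2]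
      have ih' := ih (max (max m 1) (1 + ↑(xs.takeWhile (fun s => s == "S")).length)) (by positivity)
      rw [hd] at ih'
      have halt2 : max_consecutive_free_seats_alt (y :: ys) = max_consecutive_free_seats_alt ys := by
        rw [max_consecutive_free_seats_alt]; simp [hy]
      rw [List.foldl_cons] at ih'
      have hstep2' : pvStepA (max (max m 1) (1 + ↑(xs.takeWhile (fun s => s == "S")).length), 0) y
          = (max (max m 1) (1 + ↑(xs.takeWhile (fun s => s == "S")).length), 0) := by
        simp [pvStepA, hy]
      rw [hstep2'] at ih'
      rw [ih', halt2]
      have := altGo_nonneg ys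
      omega
  | case3 x xs hx ih =>
    simp only [max_consecutive_free_seats_alt, hx, List.foldl_cons]
    have hstep : pvStepA (m, 0) x = (m, 0) := by simp [pvStepA, hx]
    rw [hstep, ih _ hm]
    simp

-- ===== VERDICT (by name: the statement is the Claim_ definition above) =====
theorem max_consecutive_free_seats_spec : Claim_equal_max_consecutive_free_seats := by
  intro arr _
  unfold Spec_max_consecutive_free_seats
  rw [foldA_eq, main_lemma arr 0 le_rfl]
  have := altGo_nonneg arr
  omega
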